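-- pv_equiv track=rewrite | github.com/TdotA/Python_for_CS1 | Exercises_4/abbreviations.py | all_abbrev
-- ===== SOURCE A (Python) =====
-- def all_abbrev(phrase, m):
--     if len(phrase) == 0:
--         return ['']
--     l = []
--     for rest in all_abbrev(phrase[1:], m):
--         for i in range(m +1):
--             l.append(phrase[0][:i] + rest)
--     return l
-- ===== SOURCE B (Python) =====
-- import itertools
-- def all_abbrev(phrase, m):
--     choices = [[w[:i] for i in range(m + 1)] for w in phrase]
--     return [''.join(reversed(t)) for t in itertools.product(*reversed(choices))]
-- ===== Notes on version B (the rewrite author's own statement) =====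
-- stated objective: alternative
-- what changed: Replaces the recursion with a staged pipeline: first build the list of prefix choices per word, then take their cartesian product (itertools.product over the reversed choice lists), then join each tuple reversed; no recursion and no per-call appending.
import Mathlib
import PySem

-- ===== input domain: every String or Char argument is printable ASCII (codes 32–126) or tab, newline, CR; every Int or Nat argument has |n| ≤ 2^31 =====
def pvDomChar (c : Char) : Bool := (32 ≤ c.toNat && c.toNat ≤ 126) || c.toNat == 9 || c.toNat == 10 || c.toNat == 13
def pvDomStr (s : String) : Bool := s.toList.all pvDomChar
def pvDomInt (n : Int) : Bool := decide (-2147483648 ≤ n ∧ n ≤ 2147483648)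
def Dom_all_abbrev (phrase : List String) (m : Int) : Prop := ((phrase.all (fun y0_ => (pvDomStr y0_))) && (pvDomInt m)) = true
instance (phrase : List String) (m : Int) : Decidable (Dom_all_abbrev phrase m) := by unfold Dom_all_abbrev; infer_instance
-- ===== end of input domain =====

-- B replaces A's recursion by a staged pipeline (per-word prefix lists, cartesian product, join);
-- return values proved equal on all inputs.

-- ===== PORT A =====
-- recursion on the list structure: phrase[0] is the head, phrase[1:] the tail
def all_abbrev (phrase : List String) (m : Int) : List String :=
  match phrase with
  | [] => [""]
  | w :: rest =>
    (all_abbrev rest m).foldl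
      (fun l r =>
        (PySem.List.pyRange 0 (m + 1) 1).foldl
          (fun l i => l ++ [PySem.Str.slice w none (some i) ++ r]) l)
      []

-- ===== PORT B =====
-- itertools.product ported as a left fold over the factor lists: each step extends
-- every partial tuple by every element of the next factor (last factor varies fastest)
def pyProduct (factors : List (List String)) : List (List String) :=
  factors.foldl (fun acc L => acc.flatMap (fun t => L.map (fun x => t ++ [x]))) [[]]

def all_abbrev_alt (phrase : List String) (m : Int) : List String :=
  let choices := phrase.map (fun w =>
    (PySem.List.pyRange 0 (m + 1) 1).map (fun i => PySem.Str.slice w none (some i)))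
  (pyProduct choices.reverse).map (fun t => PySem.Str.join "" t.reverse)

-- ===== PRECONDITION & SPEC =====
def Spec_all_abbrev (phrase : List String) (m : Int) (out : List String) : Prop := out = all_abbrev_alt phrase m
instance (phrase : List String) (m : Int) (out : List String) : Decidable (Spec_all_abbrev phrase m out) := by unfold Spec_all_abbrev; infer_instance

-- ===== CLAIM (what is proved, stated in full; the proofs are below) =====
def Claim_equal_all_abbrev : Prop := ∀ (phrase : List String) (m : Int), Dom_all_abbrev phrase m → Spec_all_abbrev phrase m (all_abbrev phrase m)

-- ===== LEMMAS AND PROOFS =====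

theorem intercalate_nil_eq_flatten {α : Type} (l : List (List α)) :
    List.intercalate [] l = l.flatten := by
  induction l with
  | nil => rfl
  | cons a t ih =>
    cases t with
    | nil => simp [List.intercalate]
    | cons b u => simp_all [List.intercalate, List.intersperse]

theorem join_empty_cons (x : String) (ts : List String) :
    PySem.Str.join "" (x :: ts) = x ++ PySem.Str.join "" ts := by
  simp [PySem.Str.join, PySem.Chars.join, intercalate_nil_eq_flatten, String.ofList]
  rfl

theorem pyProduct_append_singleton (fs : List (List String)) (L : List String) :
    pyProduct (fs ++ [L]) = (pyProduct fs).flatMap (fun t => L.map (fun x => t ++ [x])) := by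
  simp [pyProduct]

theorem all_abbrev_eq_alt (phrase : List String) (m : Int) :
    all_abbrev phrase m = all_abbrev_alt phrase m := by
  induction phrase with
  | nil => rfl
  | cons w rest ih =>
    have hA : all_abbrev (w :: rest) m
        = (all_abbrev rest m).flatMap (fun r =>
            (PySem.List.pyRange 0 (m + 1) 1).map
              (fun i => PySem.Str.slice w none (some i) ++ r)) := by
      show (all_abbrev rest m).foldl _ [] = _
      rw [show (fun (l : List String) (r : String) =>
            (PySem.List.pyRange 0 (m + 1) 1).foldl
              (fun l i => l ++ [PySem.Str.slice w none (some i) ++ r]) l)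
          = (fun (l : List String) (r : String) =>
              l ++ (PySem.List.pyRange 0 (m + 1) 1).map
                (fun i => PySem.Str.slice w none (some i) ++ r)) from
        funext fun l => funext fun r =>
          PySem.List.foldl_append_singleton_eq_map _ _ _]
      rw [PySem.List.foldl_append_eq_flatMap]
      rfl
    have hB : all_abbrev_alt (w :: rest) m
        = (all_abbrev_alt rest m).flatMap (fun r =>
            (PySem.List.pyRange 0 (m + 1) 1).map
              (fun i => PySem.Str.slice w none (some i) ++ r)) := by
      simp only [all_abbrev_alt]
      rw [List.map_cons, List.reverse_cons, pyProduct_append_singleton]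
      rw [List.map_flatMap, List.flatMap_map]
      congr 1
      funext t
      rw [List.map_map, List.map_map]
      congr 1
      funext i
      simp [join_empty_cons]
    rw [hA, hB, ih]

-- ===== VERDICT (by name: the statement is the Claim_ definition above) =====
theorem all_abbrev_spec : Claim_equal_all_abbrev := by
  intro phrase m _
  exact all_abbrev_eq_alt phrase m
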